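-- pv_equiv track=rewrite | github.com/vrijsinghani/kakuro | docs/kakurov2.py | compute_runs
-- ===== SOURCE A (Python) =====
-- def compute_runs(grid, h, w):
--     h_runs, v_runs = [], []
--     for i in range(h):
--         j = 0
--         while j < w:
--             if grid[i][j] == -1:
--                 start = j + 1
--                 length = 0
--                 while start + length < w and grid[i][start + length] != -1:
--                     length += 1
--                 if length >= 2:
--                     h_runs.append([i, start, length, 0])
--                 j = start + length
--             else:
--                 j += 1
--     for j in range(w):
--         i = 0
--         while i < h:
--             if grid[i][j] == -1:
--                 start = i + 1
--                 length = 0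
--                 while start + length < h and grid[start + length][j] != -1:
--                     length += 1
--                 if length >= 2:
--                     v_runs.append([start, j, length, 0])
--                 i = start + length
--             else:
--                 i += 1
--     return h_runs, v_runs
-- ===== SOURCE B (Python) =====
-- def line_runs(cells):
--     # one flat pass: `cur` is the pending (start, length) run, active once a -1 has been seen
--     runs = []
--     cur = None
--     for k, v in enumerate(cells):
--         if v == -1:
--             if cur is not None and cur[1] >= 2:
--                 runs.append(cur)
--             cur = (k + 1, 0)
--         elif cur is not None:
--             cur = (cur[0], cur[1] + 1)
--     if cur is not None and cur[1] >= 2: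
--         runs.append(cur)
--     return runs
--
-- def compute_runs(grid, h, w):
--     h_runs, v_runs = [], []
--     for i in range(h):
--         for (s, l) in line_runs([grid[i][j] for j in range(w)]):
--             h_runs.append([i, s, l, 0])
--     for j in range(w):
--         for (s, l) in line_runs([grid[i][j] for i in range(h)]):
--             v_runs.append([s, j, l, 0])
--     return h_runs, v_runs
-- ===== Notes on version B (the rewrite author's own statement) =====
-- stated objective: simpler
-- what changed: Replaces A's per-line nested while-loops with jumping index arithmetic by a single flat pass per line (a shared line_runs helper folding over enumerate with a pending-run state), applied to each row and each extracted column.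
import Mathlib
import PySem

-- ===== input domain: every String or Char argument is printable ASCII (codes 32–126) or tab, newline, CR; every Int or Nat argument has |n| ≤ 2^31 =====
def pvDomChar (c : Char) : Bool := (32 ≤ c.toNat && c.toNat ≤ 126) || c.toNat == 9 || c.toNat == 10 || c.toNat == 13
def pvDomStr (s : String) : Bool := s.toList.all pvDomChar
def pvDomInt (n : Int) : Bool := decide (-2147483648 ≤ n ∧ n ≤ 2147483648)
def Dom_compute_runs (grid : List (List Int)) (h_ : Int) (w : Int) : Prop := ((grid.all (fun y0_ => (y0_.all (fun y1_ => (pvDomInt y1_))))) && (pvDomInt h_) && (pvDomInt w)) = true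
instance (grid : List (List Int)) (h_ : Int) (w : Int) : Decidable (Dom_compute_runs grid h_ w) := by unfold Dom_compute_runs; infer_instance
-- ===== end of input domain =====

-- B replaces A's nested while-loops (with jumping index arithmetic) by one flat pass per line
-- with a pending-run state, shared between rows and columns; same cost, simpler decomposition.


-- grid[i][j]; the defaults are only reached outside Pre_ (where Python raises IndexError),
-- and both ports read cells through this same accessor
def pvCell (grid : List (List Int)) (i j : Int) : Int :=
  PySem.List.pyGetD (PySem.List.pyGetD grid i []) j 0

-- ===== PORT A =====
-- inner 'while start + length < w and grid[i][start+length] != -1: length += 1'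
def aScanH (grid : List (List Int)) (i w start length : Int) : Int :=
  if h : start + length < w ∧ pvCell grid i (start + length) ≠ -1 then
    aScanH grid i w start (length + 1)
  else length
termination_by (w - (start + length)).toNat
decreasing_by omega

-- needed for termination of the outer row loop
theorem aScanH_ge (grid : List (List Int)) (i w start length : Int) :
    length ≤ aScanH grid i w start length := by
  fun_induction aScanH <;> omega

-- outer 'while j < w' of the row loop
def aRowH (grid : List (List Int)) (i w j : Int) (acc : List (List Int)) : List (List Int) :=
  if hj : j < w then
    if pvCell grid i j = -1 then
      let start := j + 1
      let length := aScanH grid i w start 0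
      aRowH grid i w (start + length)
        (if length ≥ 2 then acc ++ [[i, start, length, 0]] else acc)
    else aRowH grid i w (j + 1) acc
  else acc
termination_by (w - j).toNat
decreasing_by
  · have := aScanH_ge grid i w (j + 1) 0; omega
  · omega

-- inner 'while start + length < h and grid[start+length][j] != -1: length += 1'
def aScanV (grid : List (List Int)) (j h_ start length : Int) : Int :=
  if h : start + length < h_ ∧ pvCell grid (start + length) j ≠ -1 then
    aScanV grid j h_ start (length + 1)
  else length
termination_by (h_ - (start + length)).toNat
decreasing_by omega

-- needed for termination of the outer column loop
theorem aScanV_ge (grid : List (List Int)) (j h_ start length : Int) :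
    length ≤ aScanV grid j h_ start length := by
  fun_induction aScanV <;> omega

-- outer 'while i < h' of the column loop
def aColV (grid : List (List Int)) (j h_ i : Int) (acc : List (List Int)) : List (List Int) :=
  if hi : i < h_ then
    if pvCell grid i j = -1 then
      let start := i + 1
      let length := aScanV grid j h_ start 0
      aColV grid j h_ (start + length)
        (if length ≥ 2 then acc ++ [[start, j, length, 0]] else acc)
    else aColV grid j h_ (i + 1) acc
  else acc
termination_by (h_ - i).toNat
decreasing_by
  · have := aScanV_ge grid j h_ (i + 1) 0; omega
  · omega

def compute_runs (grid : List (List Int)) (h_ : Int) (w : Int) :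
    List (List Int) × List (List Int) :=
  ((PySem.List.pyRange 0 h_ 1).foldl (fun acc i => aRowH grid i w 0 acc) [],
   (PySem.List.pyRange 0 w 1).foldl (fun acc j => aColV grid j h_ 0 acc) [])

-- ===== PORT B =====
-- one step of line_runs' flat pass: state = (runs so far, pending (start, length) run)
def lrStep (st : List (Int × Int) × Option (Int × Int)) (kv : Int × Int) :
    List (Int × Int) × Option (Int × Int) :=
  if kv.2 = -1 then
    ((match st.2 with
      | some c => if c.2 ≥ 2 then st.1 ++ [c] else st.1
      | none => st.1), some (kv.1 + 1, 0))
  else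
    match st.2 with
    | some c => (st.1, some (c.1, c.2 + 1))
    | none => st

-- the final 'if cur is not None and cur[1] >= 2: runs.append(cur)'
def lrFlush (st : List (Int × Int) × Option (Int × Int)) : List (Int × Int) :=
  match st.2 with
  | some c => if c.2 ≥ 2 then st.1 ++ [c] else st.1
  | none => st.1

def lineRuns (cells : List Int) : List (Int × Int) :=
  lrFlush ((PySem.List.enumerate cells 0).foldl lrStep ([], none))

def compute_runs_alt (grid : List (List Int)) (h_ : Int) (w : Int) :
    List (List Int) × List (List Int) :=
  ((PySem.List.pyRange 0 h_ 1).foldl (fun acc i =>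
      (lineRuns ((PySem.List.pyRange 0 w 1).map (fun j => pvCell grid i j))).foldl
        (fun acc2 sl => acc2 ++ [[i, sl.1, sl.2, 0]]) acc) [],
   (PySem.List.pyRange 0 w 1).foldl (fun acc j =>
      (lineRuns ((PySem.List.pyRange 0 h_ 1).map (fun i => pvCell grid i j))).foldl
        (fun acc2 sl => acc2 ++ [[sl.1, j, sl.2, 0]]) acc) [])

-- ===== PRECONDITION & SPEC =====
-- exactly the inputs where Python A returns (no IndexError): whenever both h and w are
-- positive, the first h rows must exist and each have at least w cells
def Pre_compute_runs (grid : List (List Int)) (h_ : Int) (w : Int) : Prop :=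
  0 < h_ → 0 < w →
    (h_ ≤ (grid.length : Int) ∧ ∀ row ∈ grid.take h_.toNat, w ≤ (row.length : Int))
instance (grid : List (List Int)) (h_ : Int) (w : Int) : Decidable (Pre_compute_runs grid h_ w) := by
  unfold Pre_compute_runs; infer_instance

def pvWitness_compute_runs : List (List Int) × Int × Int :=
  ([[-1, 1, 2, -1], [-1, 3, 4, 5]], 2, 4)

def Spec_compute_runs (grid : List (List Int)) (h_ : Int) (w : Int) (out : List (List Int) × List (List Int)) : Prop := out = compute_runs_alt grid h_ w
instance (grid : List (List Int)) (h_ : Int) (w : Int) (out : List (List Int) × List (List Int)) : Decidable (Spec_compute_runs grid h_ w out) := by unfold Spec_compute_runs; infer_instance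

-- ===== CLAIM (what is proved, stated in full; the proofs are below) =====
def Claim_equal_compute_runs : Prop := ∀ (grid : List (List Int)) (h_ : Int) (w : Int), Dom_compute_runs grid h_ w → Pre_compute_runs grid h_ w → Spec_compute_runs grid h_ w (compute_runs grid h_ w)

-- ===== LEMMAS AND PROOFS =====

-- length of the non-(-1) prefix of a line
def cN : List Int → Nat
  | [] => 0
  | c :: r => if c = -1 then 0 else cN r + 1

-- runs emitted from a line while a run (start s, length L so far) is pending
def procS (s L : Int) : List Int → List (Int × Int)
  | [] => if L ≥ 2 then [(s, L)] else []
  | c :: r =>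
    if c = -1 then (if L ≥ 2 then [(s, L)] else []) ++ procS (s + L + 1) 0 r
    else procS s (L + 1) r

-- runs emitted with no pending run (before the first -1); pos = absolute index
def procN (pos : Int) : List Int → List (Int × Int)
  | [] => []
  | c :: r => if c = -1 then procS (pos + 1) 0 r else procN (pos + 1) r

-- a pending run closes at the next -1 (or at the end of the line)
theorem procS_eq (r : List Int) : ∀ s L : Int,
    procS s L r = (if L + (cN r : Int) ≥ 2 then [(s, L + cN r)] else [])
      ++ procN (s + L + cN r) (r.drop (cN r)) := by
  induction r with
  | nil => intro s L; simp [procS, procN, cN]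
  | cons c r ih =>
    intro s L
    by_cases hc : c = -1
    · simp [procS, procN, cN, hc]
    · have h := ih s (L + 1)
      simp only [procS, cN, if_neg hc]
      rw [h]
      push_cast
      have e1 : L + 1 + (cN r : Int) = L + ((cN r : Int) + 1) := by ring
      have e2 : s + (L + 1) + (cN r : Int) = s + L + ((cN r : Int) + 1) := by ring
      rw [e1, e2, List.drop_succ_cons]

-- B's fold from a pending-run state computes procS
theorem lrStep_some_flush (cells : List Int) : ∀ (s L : Int) (runs : List (Int × Int)),
    lrFlush ((PySem.List.enumerate cells (s + L)).foldl lrStep (runs, some (s, L)))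
      = runs ++ procS s L cells := by
  induction cells with
  | nil =>
    intro s L runs
    simp only [PySem.List.enumerate_nil, List.foldl_nil, lrFlush, procS]
    split_ifs <;> simp
  | cons c r ih =>
    intro s L runs
    rw [PySem.List.enumerate_cons, List.foldl_cons]
    by_cases hc : c = -1
    · have h1 : lrStep (runs, some (s, L)) (s + L, c)
          = ((if L ≥ 2 then runs ++ [(s, L)] else runs), some (s + L + 1, 0)) := by
        simp [lrStep, hc]
      rw [h1]
      have h2 := ih (s + L + 1) 0 (if L ≥ 2 then runs ++ [(s, L)] else runs)
      have e : s + L + 1 + 0 = s + L + 1 := by ring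
      rw [e] at h2
      rw [h2]
      simp only [procS, if_pos hc]
      split_ifs <;> simp
    · have h1 : lrStep (runs, some (s, L)) (s + L, c) = (runs, some (s, L + 1)) := by
        simp [lrStep, hc]
      rw [h1]
      have h2 := ih s (L + 1) runs
      have e : s + (L + 1) = s + L + 1 := by ring
      rw [e] at h2
      rw [h2]
      simp [procS, hc]

-- B's fold from the initial state computes procN
theorem lrStep_none_flush (cells : List Int) : ∀ (pos : Int) (runs : List (Int × Int)),
    lrFlush ((PySem.List.enumerate cells pos).foldl lrStep (runs, none))
      = runs ++ procN pos cells := by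
  induction cells with
  | nil => intro pos runs; simp [PySem.List.enumerate_nil, lrFlush, procN]
  | cons c r ih =>
    intro pos runs
    rw [PySem.List.enumerate_cons, List.foldl_cons]
    by_cases hc : c = -1
    · have h1 : lrStep (runs, none) (pos, c) = (runs, some (pos + 1, 0)) := by
        simp [lrStep, hc]
      rw [h1]
      have h2 := lrStep_some_flush r (pos + 1) 0 runs
      have e : pos + 1 + 0 = pos + 1 := by ring
      rw [e] at h2
      rw [h2]
      simp [procN, hc]
    · have h1 : lrStep (runs, none) (pos, c) = (runs, none) := by
        simp [lrStep, hc]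
      rw [h1, ih (pos + 1) runs]
      simp [procN, hc]

theorem lineRuns_eq (cells : List Int) : lineRuns cells = procN 0 cells := by
  have := lrStep_none_flush cells 0 []
  simpa [lineRuns] using this

-- A's inner horizontal while-loop counts the non-(-1) prefix
theorem scanH_eq (grid : List (List Int)) (i w : Int)
    (cells : List Int) (hc : cells = (PySem.List.pyRange 0 w 1).map (fun j => pvCell grid i j)) :
    ∀ (n : Nat) (s L : Int), 0 ≤ s → 0 ≤ L → (w - (s + L)).toNat ≤ n →
      aScanH grid i w s L = L + (cN (cells.drop (s + L).toNat) : Int) := by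
  have hlen : cells.length = w.toNat := by
    rw [hc]; simp [PySem.List.length_pyRange_one]
  have hget : ∀ (k : Nat) (hk : k < cells.length), cells[k] = pvCell grid i (k : Int) := by
    intro k hk
    subst hc
    simp only [List.getElem_map, PySem.List.getElem_pyRange_one]
    norm_num
  intro n
  induction n with
  | zero =>
    intro s L hs hL hn
    rw [aScanH, dif_neg (by omega : ¬(s + L < w ∧ pvCell grid i (s + L) ≠ -1))]
    have : cells.drop (s + L).toNat = [] := List.drop_eq_nil_of_le (by omega)
    simp [this, cN]
  | succ n ih =>
    intro s L hs hL hn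
    by_cases hlt : s + L < w
    · have hk : (s + L).toNat < cells.length := by omega
      have hdrop : cells.drop (s + L).toNat
          = cells[(s + L).toNat] :: cells.drop ((s + L).toNat + 1) :=
        List.drop_eq_getElem_cons hk
      have hcell : cells[(s + L).toNat] = pvCell grid i (s + L) := by
        rw [hget _ hk]; congr 1; omega
      by_cases hv : pvCell grid i (s + L) = -1
      · rw [aScanH, dif_neg (by tauto)]
        rw [hdrop, hcell]
        simp [cN, hv]
      · rw [aScanH, dif_pos ⟨hlt, hv⟩]
        have h2 := ih s (L + 1) hs (by omega) (by omega)
        rw [h2, hdrop, hcell]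
        have e : (s + (L + 1)).toNat = (s + L).toNat + 1 := by omega
        rw [e] at h2 ⊢
        simp only [cN, if_neg hv]
        push_cast
        ring
    · rw [aScanH, dif_neg (by tauto)]
      have : cells.drop (s + L).toNat = [] := List.drop_eq_nil_of_le (by omega)
      simp [this, cN]

-- A's outer row loop equals the flat-pass characterisation procN
theorem rowH_eq (grid : List (List Int)) (i w : Int)
    (cells : List Int) (hc : cells = (PySem.List.pyRange 0 w 1).map (fun j => pvCell grid i j)) :
    ∀ (n : Nat) (j : Int) (acc : List (List Int)), 0 ≤ j → (w - j).toNat ≤ n →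
      aRowH grid i w j acc
        = acc ++ (procN j (cells.drop j.toNat)).map (fun sl => [i, sl.1, sl.2, 0]) := by
  have hlen : cells.length = w.toNat := by
    rw [hc]; simp [PySem.List.length_pyRange_one]
  have hget : ∀ (k : Nat) (hk : k < cells.length), cells[k] = pvCell grid i (k : Int) := by
    intro k hk
    subst hc
    simp only [List.getElem_map, PySem.List.getElem_pyRange_one]
    norm_num
  intro n
  induction n with
  | zero =>
    intro j acc hj hn
    rw [aRowH, dif_neg (by omega : ¬ j < w)]
    have : cells.drop j.toNat = [] := List.drop_eq_nil_of_le (by omega)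
    simp [this, procN]
  | succ n ih =>
    intro j acc hj hn
    by_cases hjw : j < w
    · have hk : j.toNat < cells.length := by omega
      have hdrop : cells.drop j.toNat = cells[j.toNat] :: cells.drop (j.toNat + 1) :=
        List.drop_eq_getElem_cons hk
      have hcell : cells[j.toNat] = pvCell grid i j := by
        rw [hget _ hk]; congr 1; omega
      by_cases hv : pvCell grid i j = -1
      · rw [aRowH, dif_pos hjw, if_pos hv]
        have hscan : aScanH grid i w (j + 1) 0
            = 0 + (cN (cells.drop (j + 1 + 0).toNat) : Int) :=
          scanH_eq grid i w cells hc (w - (j + 1)).toNat (j + 1) 0 (by omega) le_rfl (by omega)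
        have e0 : (j + 1 + 0 : Int).toNat = j.toNat + 1 := by omega
        rw [e0] at hscan
        show aRowH grid i w ((j + 1) + aScanH grid i w (j + 1) 0)
            (if aScanH grid i w (j + 1) 0 ≥ 2 then
               acc ++ [[i, j + 1, aScanH grid i w (j + 1) 0, 0]] else acc)
            = acc ++ (procN j (cells.drop j.toNat)).map (fun sl => [i, sl.1, sl.2, 0])
        rw [hscan]
        have hih := ih (j + 1 + (0 + (cN (cells.drop (j.toNat + 1)) : Int)))
          (if 0 + (cN (cells.drop (j.toNat + 1)) : Int) ≥ 2 then
             acc ++ [[i, j + 1, 0 + (cN (cells.drop (j.toNat + 1)) : Int), 0]] else acc)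
          (by omega) (by omega)
        rw [hih]
        rw [hdrop, hcell]
        simp only [procN, if_pos hv]
        rw [procS_eq]
        have e1 : (j + 1 + (0 + (cN (cells.drop (j.toNat + 1)) : Int))).toNat
            = cN (cells.drop (j.toNat + 1)) + (j.toNat + 1) := by omega
        rw [e1, List.drop_drop]
        have e2 : (j + 1 + 0 + (cN (cells.drop (j.toNat + 1)) : Int))
            = j + 1 + (0 + (cN (cells.drop (j.toNat + 1)) : Int)) := by ring
        rw [e2]
        split_ifs with hge2 <;> simp_all [Nat.add_comm]
      · rw [aRowH, dif_pos hjw, if_neg hv]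
        rw [ih (j + 1) acc (by omega) (by omega)]
        rw [hdrop, hcell]
        simp only [procN, if_neg hv]
        have e : (j + 1 : Int).toNat = j.toNat + 1 := by omega
        rw [e]
    · rw [aRowH, dif_neg hjw]
      have : cells.drop j.toNat = [] := List.drop_eq_nil_of_le (by omega)
      simp [this, procN]

-- A's inner vertical while-loop counts the non-(-1) prefix of the column
theorem scanV_eq (grid : List (List Int)) (j h_ : Int)
    (cells : List Int) (hc : cells = (PySem.List.pyRange 0 h_ 1).map (fun i => pvCell grid i j)) :
    ∀ (n : Nat) (s L : Int), 0 ≤ s → 0 ≤ L → (h_ - (s + L)).toNat ≤ n →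
      aScanV grid j h_ s L = L + (cN (cells.drop (s + L).toNat) : Int) := by
  have hlen : cells.length = h_.toNat := by
    rw [hc]; simp [PySem.List.length_pyRange_one]
  have hget : ∀ (k : Nat) (hk : k < cells.length), cells[k] = pvCell grid (k : Int) j := by
    intro k hk
    subst hc
    simp only [List.getElem_map, PySem.List.getElem_pyRange_one]
    norm_num
  intro n
  induction n with
  | zero =>
    intro s L hs hL hn
    rw [aScanV, dif_neg (by omega : ¬(s + L < h_ ∧ pvCell grid (s + L) j ≠ -1))]
    have : cells.drop (s + L).toNat = [] := List.drop_eq_nil_of_le (by omega)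
    simp [this, cN]
  | succ n ih =>
    intro s L hs hL hn
    by_cases hlt : s + L < h_
    · have hk : (s + L).toNat < cells.length := by omega
      have hdrop : cells.drop (s + L).toNat
          = cells[(s + L).toNat] :: cells.drop ((s + L).toNat + 1) :=
        List.drop_eq_getElem_cons hk
      have hcell : cells[(s + L).toNat] = pvCell grid (s + L) j := by
        rw [hget _ hk]; congr 1; omega
      by_cases hv : pvCell grid (s + L) j = -1
      · rw [aScanV, dif_neg (by tauto)]
        rw [hdrop, hcell]
        simp [cN, hv]
      · rw [aScanV, dif_pos ⟨hlt, hv⟩]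
        have h2 := ih s (L + 1) hs (by omega) (by omega)
        rw [h2, hdrop, hcell]
        have e : (s + (L + 1)).toNat = (s + L).toNat + 1 := by omega
        rw [e] at h2 ⊢
        simp only [cN, if_neg hv]
        push_cast
        ring
    · rw [aScanV, dif_neg (by tauto)]
      have : cells.drop (s + L).toNat = [] := List.drop_eq_nil_of_le (by omega)
      simp [this, cN]

-- A's outer column loop equals the flat-pass characterisation procN
theorem colV_eq (grid : List (List Int)) (j h_ : Int)
    (cells : List Int) (hc : cells = (PySem.List.pyRange 0 h_ 1).map (fun i => pvCell grid i j)) :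
    ∀ (n : Nat) (i : Int) (acc : List (List Int)), 0 ≤ i → (h_ - i).toNat ≤ n →
      aColV grid j h_ i acc
        = acc ++ (procN i (cells.drop i.toNat)).map (fun sl => [sl.1, j, sl.2, 0]) := by
  have hlen : cells.length = h_.toNat := by
    rw [hc]; simp [PySem.List.length_pyRange_one]
  have hget : ∀ (k : Nat) (hk : k < cells.length), cells[k] = pvCell grid (k : Int) j := by
    intro k hk
    subst hc
    simp only [List.getElem_map, PySem.List.getElem_pyRange_one]
    norm_num
  intro n
  induction n with
  | zero =>
    intro i acc hi hn
    rw [aColV, dif_neg (by omega : ¬ i < h_)]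
    have : cells.drop i.toNat = [] := List.drop_eq_nil_of_le (by omega)
    simp [this, procN]
  | succ n ih =>
    intro i acc hi hn
    by_cases hih_ : i < h_
    · have hk : i.toNat < cells.length := by omega
      have hdrop : cells.drop i.toNat = cells[i.toNat] :: cells.drop (i.toNat + 1) :=
        List.drop_eq_getElem_cons hk
      have hcell : cells[i.toNat] = pvCell grid i j := by
        rw [hget _ hk]; congr 1; omega
      by_cases hv : pvCell grid i j = -1
      · rw [aColV, dif_pos hih_, if_pos hv]
        have hscan : aScanV grid j h_ (i + 1) 0
            = 0 + (cN (cells.drop (i + 1 + 0).toNat) : Int) :=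
          scanV_eq grid j h_ cells hc (h_ - (i + 1)).toNat (i + 1) 0 (by omega) le_rfl (by omega)
        have e0 : (i + 1 + 0 : Int).toNat = i.toNat + 1 := by omega
        rw [e0] at hscan
        show aColV grid j h_ ((i + 1) + aScanV grid j h_ (i + 1) 0)
            (if aScanV grid j h_ (i + 1) 0 ≥ 2 then
               acc ++ [[i + 1, j, aScanV grid j h_ (i + 1) 0, 0]] else acc)
            = acc ++ (procN i (cells.drop i.toNat)).map (fun sl => [sl.1, j, sl.2, 0])
        rw [hscan]
        have hih := ih (i + 1 + (0 + (cN (cells.drop (i.toNat + 1)) : Int)))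
          (if 0 + (cN (cells.drop (i.toNat + 1)) : Int) ≥ 2 then
             acc ++ [[i + 1, j, 0 + (cN (cells.drop (i.toNat + 1)) : Int), 0]] else acc)
          (by omega) (by omega)
        rw [hih]
        rw [hdrop, hcell]
        simp only [procN, if_pos hv]
        rw [procS_eq]
        have e1 : (i + 1 + (0 + (cN (cells.drop (i.toNat + 1)) : Int))).toNat
            = cN (cells.drop (i.toNat + 1)) + (i.toNat + 1) := by omega
        rw [e1, List.drop_drop]
        have e2 : (i + 1 + 0 + (cN (cells.drop (i.toNat + 1)) : Int))
            = i + 1 + (0 + (cN (cells.drop (i.toNat + 1)) : Int)) := by ring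
        rw [e2]
        split_ifs with hge2 <;> simp_all [Nat.add_comm]
      · rw [aColV, dif_pos hih_, if_neg hv]
        rw [ih (i + 1) acc (by omega) (by omega)]
        rw [hdrop, hcell]
        simp only [procN, if_neg hv]
        have e : (i + 1 : Int).toNat = i.toNat + 1 := by omega
        rw [e]
    · rw [aColV, dif_neg hih_]
      have : cells.drop i.toNat = [] := List.drop_eq_nil_of_le (by omega)
      simp [this, procN]

-- ===== VERDICT (by name: the statement is the Claim_ definition above) =====
theorem compute_runs_spec : Claim_equal_compute_runs := by
  intro grid h_ w _ _
  unfold Spec_compute_runs compute_runs compute_runs_alt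
  have hH : ∀ (acc : List (List Int)) (i : Int),
      aRowH grid i w 0 acc
        = acc ++ (lineRuns ((PySem.List.pyRange 0 w 1).map (fun j => pvCell grid i j))).map
            (fun sl => [i, sl.1, sl.2, 0]) := by
    intro acc i
    rw [lineRuns_eq]
    have := rowH_eq grid i w _ rfl w.toNat 0 acc le_rfl (by omega)
    simpa using this
  have hV : ∀ (acc : List (List Int)) (j : Int),
      aColV grid j h_ 0 acc
        = acc ++ (lineRuns ((PySem.List.pyRange 0 h_ 1).map (fun i => pvCell grid i j))).map
            (fun sl => [sl.1, j, sl.2, 0]) := by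
    intro acc j
    rw [lineRuns_eq]
    have := colV_eq grid j h_ _ rfl h_.toNat 0 acc le_rfl (by omega)
    simpa using this
  refine Prod.ext ?_ ?_
  · apply PySem.List.foldl_congr_mem
    intro acc i _
    rw [hH acc i, PySem.List.foldl_append_singleton_eq_map]
  · apply PySem.List.foldl_congr_mem
    intro acc j _
    rw [hV acc j, PySem.List.foldl_append_singleton_eq_map]
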